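/- GENERATED by tools/from_farm_form.py from prooffarm-gif/accepted/DGifSlurp.10/Proof.lean (a worked proof of the farm's unit `DGifSlurp.10`,
   accepted by the verdict) — do not edit. -/
import Gif.Spec.Units.DGifSlurp_10
import Gif.Spec.AllSegs
import Gif.Spec.Proved.DGifSlurp_10_Lemmas

open X86 X86.User Asan ProgX.Base ProgX.Base.Spec Gif.Spec

/-!
  `DGifSlurp.10` (0x10a853 … 0x10a8a2, 23 instructions; dgif_lib.c:1277-1289): A BODY SEGMENT OF A PROTECTED FUNCTION WITH TWO
  CONTRACT CALLS (`DGifGetExtension`, `GifAddExtensionBlock`) and one check call between them. The two return addresses 0x10a869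
  (`ret17`) and 0x10a89c (`ret19`) are not cuts of the design, so the unit makes them cuts of its own (`sl10_AtRet17`; at `ret19`
  the design's `Rec` says all that is live) and walks three pieces (Lemmas.lean), chained here.
-/

/-- Segment 10 of `DGifSlurp` takes `Rec` at 0x10a853 to `ExtHead` at 0x10a8a2 or to `Done` at 0x10a8ed (`Exit`). -/
theorem Gif.Spec.Proved.DGifSlurp_10_ok : Gif.Spec.DGifSlurp_10.Statement := by
  intro Lay hLay μ hμ u₀ hcode h_DGifGetExtension h_asan_load1_noabort h_GifAddExtensionBlock
  intro H rest frames F R Hc Fc m e ret v hat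
  -- the callees' contracts for the PRESENT heap and forest and the frame list of the body (the own frame in front)
  have hge := h_DGifGetExtension Hc rest (DGifSlurp.framesIn frames e) Fc R
  have hadd := h_GifAddExtensionBlock Hc rest (DGifSlurp.framesIn frames e) Fc R
  -- 0x10a853 … the call of DGifGetExtension … 0x10a869 (ret17)
  refine (Gif.Spec.DGifSlurp_10.sl10_seg_call Lay hLay μ hμ u₀ hcode H rest frames F R Hc Fc m e ret hge v hat).trans ?_
  intro v1 hv1
  -- 0x10a869 … 0x10a8ed | 0x10a8a2 | the call of GifAddExtensionBlock … 0x10a89c (ret19)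
  refine (Gif.Spec.DGifSlurp_10.sl10_seg_mid Lay hLay μ hμ u₀ hcode H rest frames F R Hc Fc m e ret h_asan_load1_noabort hadd
    v1 hv1).trans ?_
  intro v2 hv2
  rcases hv2 with hret19 | hhead | hexit
  · -- 0x10a89c … 0x10a8ed | 0x10a8a2, with the heap and forest of GifAddExtensionBlock's post
    obtain ⟨H', F', hrec⟩ := hret19
    exact Gif.Spec.DGifSlurp_10.sl10_seg_tail Lay hLay μ hμ u₀ hcode H rest frames F R H' F' m e ret v2 hrec
  · -- at the head of the sub-block loop already (`ExtData = NULL`)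
    exact ReachVia.done (Or.inl hhead)
  · -- at the epilogue already (GIF_ERROR of DGifGetExtension)
    exact ReachVia.done (Or.inr hexit)
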